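-- pv_equiv track=rewrite | github.com/vintagevikas090/Python_Programming | Python_Projects/2048_Game_Project/Logics_2048.py | game_not_over
-- ===== SOURCE A (Python) =====
-- def game_not_over(mat):
--     # if any ele is 0
--     for i in range(4):
--         for j in range(4):
--             if mat[i][j] == 0:
--                 return True
--
--     # if by some movement, it is possible to make an empty slot
--     # 1. for every row and col except last row & col
--     for i in range(3):
--         for j in range(3):
--             if (mat[i][j] == mat[i+1][j]) or (mat[i][j] == mat[i][j+1]):
--                 return True
--
--     # 2. for last row (i.e i == 3)
--     for j in range(3):
--         if mat[3][j] == mat[3][j+1]: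
--             return True
--
--     # 3. for last col (i.e j == 3)
--     for i in range(3):
--         if mat[i][3] == mat[i+1][3]:
--             return True
--
--     return False
-- ===== SOURCE B (Python) =====
-- def game_not_over(mat):
--     # single unified row-major pass: empty cell, left-neighbour match, up-neighbour match
--     for i in range(4):
--         for j in range(4):
--             v = mat[i][j]
--             if v == 0:
--                 return True
--             if j > 0 and v == mat[i][j-1]:
--                 return True
--             if i > 0 and v == mat[i-1][j]:
--                 return True
--     return False
-- ===== Notes on version B (the rewrite author's own statement) =====
-- stated objective: simpler
-- what changed: Replaces A's four differently-shaped passes (zero scan, interior pairs, last row, last column) with one unified row-major double loop that checks empty cell, left neighbour and up neighbour at each position.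
import Mathlib
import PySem

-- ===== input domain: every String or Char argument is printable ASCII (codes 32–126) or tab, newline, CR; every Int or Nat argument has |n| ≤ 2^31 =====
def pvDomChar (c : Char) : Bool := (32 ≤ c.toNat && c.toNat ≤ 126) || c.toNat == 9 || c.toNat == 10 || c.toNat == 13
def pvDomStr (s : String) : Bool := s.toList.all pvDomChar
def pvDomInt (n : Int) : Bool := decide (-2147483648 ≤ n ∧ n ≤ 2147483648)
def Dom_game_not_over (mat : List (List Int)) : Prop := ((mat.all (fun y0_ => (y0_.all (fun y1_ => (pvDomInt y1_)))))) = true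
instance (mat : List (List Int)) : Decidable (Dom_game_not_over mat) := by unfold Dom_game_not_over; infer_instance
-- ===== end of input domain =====

-- ===== PORT A =====
-- B replaces A's four differently-shaped passes with one unified row-major pass
-- (zero / left-neighbour / up-neighbour); objective: simpler.
-- cell access mat[i][j] with literal in-range indices (in range under Pre_)
def gnoCellA (mat : List (List Int)) (i j : Nat) : Int := (mat.getD i []).getD j 0

def game_not_over (mat : List (List Int)) : Bool :=
  -- if any ele is 0
  if (List.range 4).any (fun i => (List.range 4).any (fun j => gnoCellA mat i j == 0)) then true
  -- 1. every row and col except last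
  else if (List.range 3).any (fun i => (List.range 3).any (fun j =>
      gnoCellA mat i j == gnoCellA mat (i+1) j || gnoCellA mat i j == gnoCellA mat i (j+1))) then true
  -- 2. last row
  else if (List.range 3).any (fun j => gnoCellA mat 3 j == gnoCellA mat 3 (j+1)) then true
  -- 3. last col
  else if (List.range 3).any (fun i => gnoCellA mat i 3 == gnoCellA mat (i+1) 3) then true
  else false

-- ===== PORT B =====
def gnoCellB (mat : List (List Int)) (i j : Nat) : Int := (mat.getD i []).getD j 0

def game_not_over_alt (mat : List (List Int)) : Bool :=
  (List.range 4).any (fun i => (List.range 4).any (fun j =>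
    gnoCellB mat i j == 0
    || (decide (0 < j) && gnoCellB mat i j == gnoCellB mat i (j-1))
    || (decide (0 < i) && gnoCellB mat i j == gnoCellB mat (i-1) j)))

-- ===== PRECONDITION & SPEC =====
-- Pre_ is exactly the set of inputs on which the Python A returns: either the first four
-- rows form a full 4x4 block, or a 0 is met in the row-major zero scan before its first
-- out-of-range access; everywhere else A raises IndexError, and nothing is claimed there.
def Pre_game_not_over (mat : List (List Int)) : Prop :=
  (4 ≤ mat.length ∧ ∀ row ∈ mat.take 4, 4 ≤ row.length) ∨
  (∃ i < 4, i < mat.length ∧ (∀ i' < i, 4 ≤ (mat.getD i' []).length) ∧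
    ∃ j < 4, j < (mat.getD i []).length ∧ (mat.getD i []).getD j 0 = 0)
instance (mat : List (List Int)) : Decidable (Pre_game_not_over mat) := by
  unfold Pre_game_not_over; infer_instance

def pvWitness_game_not_over : List (List Int) :=
  [[2,4,8,16],[32,64,128,256],[512,1024,2,4],[8,16,32,64]]

def Spec_game_not_over (mat : List (List Int)) (out : Bool) : Prop := out = game_not_over_alt mat
instance (mat : List (List Int)) (out : Bool) : Decidable (Spec_game_not_over mat out) := by
  unfold Spec_game_not_over; infer_instance

-- ===== CLAIM =====
def Claim_equal_game_not_over : Prop :=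
  ∀ (mat : List (List Int)), Dom_game_not_over mat → Pre_game_not_over mat →
    Spec_game_not_over mat (game_not_over mat)

-- ===== LEMMAS AND PROOFS =====
theorem int_beq_comm (a b : Int) : (a == b) = (b == a) := by
  apply Bool.eq_iff_iff.mpr
  simp only [beq_iff_eq]
  exact eq_comm

-- both ports (total via getD) denote the same disjunction of the 40 cell conditions,
-- up to order and orientation of the equality tests
set_option maxHeartbeats 2000000 in
theorem gno_eq (mat : List (List Int)) : game_not_over mat = game_not_over_alt mat := by
  simp only [game_not_over, game_not_over_alt, gnoCellA, gnoCellB, List.range, List.range.loop,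
    List.any_cons, List.any_nil, Bool.or_false, Bool.if_true_left, Bool.decide_eq_true,
    Nat.reduceAdd, Nat.reduceSub, int_beq_comm]
  ac_rfl

-- ===== VERDICT =====
theorem game_not_over_spec : Claim_equal_game_not_over := by
  intro mat _ _
  unfold Spec_game_not_over
  exact gno_eq mat
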